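-- pv_equiv track=rewrite | github.com/zghaoyu/CMR_Robot | Cobot/UtilsMath.py | getLineStatisticParas
-- ===== SOURCE A (Python) =====
-- def getDictVal(dictData, key, defaultVal):
--     try:
--         val = dictData[key]
--     except Exception as e:
--         val = defaultVal
--     return val
--
-- def getLineStatisticParas(line):
--     minX = line[0][0]; maxX = minX; minY = line[0][1]; maxY = minY
--     lenPts = len(line)
--     hist_x = {}; hist_y = {}
--     for i in range(lenPts):
--         if minX > line[i][0]: minX = line[i][0]
--         if maxX < line[i][0]: maxX = line[i][0]
--         if minY > line[i][1]: minY = line[i][1]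
--         if maxY < line[i][1]: maxY = line[i][1]
--         hist_x[line[i][0]] = getDictVal(hist_x, line[i][0], 0) + 1
--         hist_y[line[i][1]] = getDictVal(hist_y, line[i][1], 0) + 1
--
--     maxHistX = [-1,0]; maxHistY = [-1,0]
--     for k in hist_x.keys():
--         if maxHistX[1] < hist_x[k]: maxHistX = [k,hist_x[k]] # x appears times
--     for k in hist_y.keys():
--         if maxHistY[1] < hist_y[k]: maxHistY = [k,hist_y[k]] # y appears times
--
--     sumX_1 = 0; sumX_2 = 0; sumY_1 = 0; sumY_2 = 0
--     for i in range(lenPts):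
--         if maxHistX[0] == line[i][0] + 1: sumX_1 = sumX_1 + 1
--         if maxHistX[0] == line[i][0] - 1: sumX_2 = sumX_2 + 1
--         if maxHistY[0] == line[i][1] + 1: sumY_1 = sumY_1 + 1
--         if maxHistY[0] == line[i][1] - 1: sumY_2 = sumY_2 + 1
--     if sumX_1 > sumX_2:
--         maxHistX.append(-1)
--         maxHistX.append(sumX_1)
--     else:
--         maxHistX.append(1)
--         maxHistX.append(sumX_2)
--     if sumY_1 > sumY_2:
--         maxHistY.append(-1)
--         maxHistY.append(sumY_1)
--     else:
--         maxHistY.append(1)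
--         maxHistY.append(sumY_2)
--
--     return [minX, maxX, minY, maxY], maxHistX, maxHistY
-- ===== SOURCE B (Python) =====
-- def getLineStatisticParas(line):
--     # no histogram dicts: the mode is found by recursively partitioning the
--     # value list by its head value; neighbor sums are direct list.count calls
--     def mode(vals):
--         if not vals:
--             return None
--         v = vals[0]
--         c = vals.count(v)
--         sub = mode([x for x in vals if x != v])
--         if sub is not None and sub[1] > c:
--             return sub
--         return (v, c)
--
--     def stats(vals):
--         m, c = mode(vals)
--         left = vals.count(m - 1)
--         right = vals.count(m + 1)
--         if left > right:
--             return [m, c, -1, left]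
--         return [m, c, 1, right]
--
--     xs = [p[0] for p in line]
--     ys = [p[1] for p in line]
--     return [min(xs), max(xs), min(ys), max(ys)], stats(xs), stats(ys)
-- ===== Notes on version B (the rewrite author's own statement) =====
-- stated objective: alternative
-- what changed: B drops A's histogram dicts and second point rescan entirely: the mode is found by a recursive partition of the coordinate list by its head value (count head, recurse on the values different from it, keep the earlier value on count ties), neighbor sums are direct list.count calls, and the bounding box uses builtin min/max on the x/y value lists.
import Mathlib
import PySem

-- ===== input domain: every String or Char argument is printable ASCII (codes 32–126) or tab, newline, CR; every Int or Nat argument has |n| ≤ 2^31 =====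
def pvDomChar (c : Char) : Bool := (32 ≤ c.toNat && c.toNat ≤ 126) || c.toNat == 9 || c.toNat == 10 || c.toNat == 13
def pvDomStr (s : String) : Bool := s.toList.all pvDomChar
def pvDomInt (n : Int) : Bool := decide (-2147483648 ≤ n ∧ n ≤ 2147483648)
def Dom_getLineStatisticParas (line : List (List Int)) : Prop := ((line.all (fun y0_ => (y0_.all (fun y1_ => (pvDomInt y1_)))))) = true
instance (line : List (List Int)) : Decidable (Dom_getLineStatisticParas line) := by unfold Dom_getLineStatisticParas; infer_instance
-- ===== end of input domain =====

-- B replaces A's histogram dicts and second point rescan by a recursive head-value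
-- partition for the mode, direct list counts for the neighbor sums, and builtin
-- min/max for the bounding box (objective: alternative; not claimed faster).

-- shared accessors: pt[0] / pt[1]; in range under Pre_, so .getD 0 is never taken
def xOf (pt : List Int) : Int := (PySem.List.pyGet? pt 0).getD 0
def yOf (pt : List Int) : Int := (PySem.List.pyGet? pt 1).getD 0

-- ===== PORT A =====
def getLineStatisticParas (line : List (List Int)) : List Int × List Int × List Int :=
  let x0 := xOf ((PySem.List.pyGet? line 0).getD [])
  let y0 := yOf ((PySem.List.pyGet? line 0).getD [])
  let st := line.foldl
    (fun (s : Int × Int × Int × Int × PySem.Dict Int Int × PySem.Dict Int Int) pt =>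
      (if s.1 > xOf pt then xOf pt else s.1,
       if s.2.1 < xOf pt then xOf pt else s.2.1,
       if s.2.2.1 > yOf pt then yOf pt else s.2.2.1,
       if s.2.2.2.1 < yOf pt then yOf pt else s.2.2.2.1,
       s.2.2.2.2.1.insert (xOf pt) (s.2.2.2.2.1.getD (xOf pt) 0 + 1),
       s.2.2.2.2.2.insert (yOf pt) (s.2.2.2.2.2.getD (yOf pt) 0 + 1)))
    (x0, x0, y0, y0, PySem.Dict.empty, PySem.Dict.empty)
  let hx := st.2.2.2.2.1
  let hy := st.2.2.2.2.2
  let mHX := hx.keys.foldl (fun (m : Int × Int) k => if m.2 < hx.getD k 0 then (k, hx.getD k 0) else m) (-1, 0)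
  let mHY := hy.keys.foldl (fun (m : Int × Int) k => if m.2 < hy.getD k 0 then (k, hy.getD k 0) else m) (-1, 0)
  let sums := line.foldl
    (fun (t : Int × Int × Int × Int) pt =>
      (if mHX.1 = xOf pt + 1 then t.1 + 1 else t.1,
       if mHX.1 = xOf pt - 1 then t.2.1 + 1 else t.2.1,
       if mHY.1 = yOf pt + 1 then t.2.2.1 + 1 else t.2.2.1,
       if mHY.1 = yOf pt - 1 then t.2.2.2 + 1 else t.2.2.2))
    (0, 0, 0, 0)
  let mX := if sums.1 > sums.2.1 then [mHX.1, mHX.2, -1, sums.1] else [mHX.1, mHX.2, 1, sums.2.1]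
  let mY := if sums.2.2.1 > sums.2.2.2 then [mHY.1, mHY.2, -1, sums.2.2.1] else [mHY.1, mHY.2, 1, sums.2.2.2]
  ([st.1, st.2.1, st.2.2.1, st.2.2.2.1], mX, mY)

-- ===== PORT B =====
-- mode(vals): recursive head-value partition; returns (value, count), earlier value wins ties
def modeB (vals : List Int) : Option (Int × Nat) :=
  match vals with
  | [] => none
  | v :: rest =>
    let c := (v :: rest).count v
    match modeB ((v :: rest).filter (fun x => decide (x ≠ v))) with
    | some sub => if c < sub.2 then some sub else some (v, c)
    | none => some (v, c)
termination_by vals.length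
decreasing_by
  have hv : (fun x => decide (x ≠ v)) v = false := by simp
  simp only [List.filter_cons, hv, List.length_cons, Bool.false_eq_true, if_false]
  exact Nat.lt_succ_of_le (List.length_filter_le _ _)

def statsB (vals : List Int) : List Int :=
  let mc := (modeB vals).getD (0, 0)
  let left := vals.count (mc.1 - 1)
  let right := vals.count (mc.1 + 1)
  if left > right then [mc.1, (mc.2 : Int), -1, (left : Int)]
  else [mc.1, (mc.2 : Int), 1, (right : Int)]

def getLineStatisticParas_alt (line : List (List Int)) : List Int × List Int × List Int :=
  let xs := line.map xOf
  let ys := line.map yOf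
  ([(PySem.List.min? xs (fun v => v)).getD 0, (PySem.List.max? xs (fun v => v)).getD 0,
    (PySem.List.min? ys (fun v => v)).getD 0, (PySem.List.max? ys (fun v => v)).getD 0],
   statsB xs, statsB ys)

-- ===== PRECONDITION & SPEC =====
-- Pre_ excludes exactly the inputs where Python A raises IndexError: the empty line
-- (line[0]) and lines containing a point with fewer than two coordinates (line[i][1]).
def Pre_getLineStatisticParas (line : List (List Int)) : Prop :=
  line ≠ [] ∧ ∀ pt ∈ line, 2 ≤ pt.length
instance (line : List (List Int)) : Decidable (Pre_getLineStatisticParas line) := by unfold Pre_getLineStatisticParas; infer_instance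
def pvWitness_getLineStatisticParas : List (List Int) := [[0, 0], [0, 1], [1, 1]]

def Spec_getLineStatisticParas (line : List (List Int)) (out : List Int × List Int × List Int) : Prop := out = getLineStatisticParas_alt line
instance (line : List (List Int)) (out : List Int × List Int × List Int) : Decidable (Spec_getLineStatisticParas line out) := by unfold Spec_getLineStatisticParas; infer_instance

-- ===== CLAIM (what is proved, stated in full; the proofs are below) =====
def Claim_equal_getLineStatisticParas : Prop := ∀ (line : List (List Int)), Dom_getLineStatisticParas line → Pre_getLineStatisticParas line → Spec_getLineStatisticParas line (getLineStatisticParas line)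

-- ===== LEMMAS AND PROOFS =====

-- A's six-accumulator first pass is six independent folds over the x/y value lists
theorem foldFirst (l : List (List Int)) :
    ∀ (a b c d : Int) (dx dy : PySem.Dict Int Int),
    l.foldl
      (fun (s : Int × Int × Int × Int × PySem.Dict Int Int × PySem.Dict Int Int) pt =>
        (if s.1 > xOf pt then xOf pt else s.1,
         if s.2.1 < xOf pt then xOf pt else s.2.1,
         if s.2.2.1 > yOf pt then yOf pt else s.2.2.1,
         if s.2.2.2.1 < yOf pt then yOf pt else s.2.2.2.1,
         s.2.2.2.2.1.insert (xOf pt) (s.2.2.2.2.1.getD (xOf pt) 0 + 1),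
         s.2.2.2.2.2.insert (yOf pt) (s.2.2.2.2.2.getD (yOf pt) 0 + 1)))
      (a, b, c, d, dx, dy)
    = ((l.map xOf).foldl (fun s x => if s > x then x else s) a,
       (l.map xOf).foldl (fun s x => if s < x then x else s) b,
       (l.map yOf).foldl (fun s y => if s > y then y else s) c,
       (l.map yOf).foldl (fun s y => if s < y then y else s) d,
       (l.map xOf).foldl (fun (h : PySem.Dict Int Int) x => h.insert x (h.getD x 0 + 1)) dx,
       (l.map yOf).foldl (fun (h : PySem.Dict Int Int) y => h.insert y (h.getD y 0 + 1)) dy) := by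
  induction l with
  | nil => intro a b c d dx dy; rfl
  | cons p t ih => intro a b c d dx dy; simp only [List.foldl_cons, List.map_cons]; exact ih _ _ _ _ _ _

-- A's second pass over the points is four neighbor counts on the value lists
theorem foldSums (mx my : Int) (l : List (List Int)) :
    ∀ (a b c d : Int),
    l.foldl
      (fun (t : Int × Int × Int × Int) pt =>
        (if mx = xOf pt + 1 then t.1 + 1 else t.1,
         if mx = xOf pt - 1 then t.2.1 + 1 else t.2.1,
         if my = yOf pt + 1 then t.2.2.1 + 1 else t.2.2.1,
         if my = yOf pt - 1 then t.2.2.2 + 1 else t.2.2.2))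
      (a, b, c, d)
    = (a + ((l.map xOf).count (mx - 1) : Int), b + ((l.map xOf).count (mx + 1) : Int),
       c + ((l.map yOf).count (my - 1) : Int), d + ((l.map yOf).count (my + 1) : Int)) := by
  induction l with
  | nil => intro a b c d; simp
  | cons p t ih =>
    intro a b c d
    simp only [List.foldl_cons, List.map_cons, List.count_cons, ih]
    refine Prod.ext ?_ (Prod.ext ?_ (Prod.ext ?_ ?_)) <;>
      (simp only []; split_ifs <;> (simp_all; try omega))

-- the running-champion scan from a live champion is "first maximal element"
theorem scanAux (c : Int → Int) (l : List Int) :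
    ∀ (a : Int), ∃ m : Int,
    l.foldl (fun (acc : Option Int) x =>
        match acc with
        | none => some x
        | some m => if c m < c x then some x else some m) (some a) = some m ∧
    l.foldl (fun (m : Int × Int) k => if m.2 < c k then (k, c k) else m) (a, c a) = (m, c m) := by
  induction l with
  | nil => intro a; exact ⟨a, rfl, rfl⟩
  | cons k t ih =>
    intro a
    simp only [List.foldl_cons]
    by_cases h : c a < c k
    · rw [if_pos h, if_pos h]; exact ih k
    · rw [if_neg h, if_neg h]; exact ih a

-- A's mode scan seeded with [-1, 0] equals max(keys, key=count) when every count is positive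
theorem modeScan (c : Int → Int) (l : List Int) (hne : l ≠ []) (hpos : ∀ k ∈ l, 0 < c k) :
    l.foldl (fun (m : Int × Int) k => if m.2 < c k then (k, c k) else m) ((-1 : Int), (0 : Int))
    = (((PySem.List.max? l c).getD (-1)), c ((PySem.List.max? l c).getD (-1))) := by
  cases l with
  | nil => exact absurd rfl hne
  | cons k t =>
    have hk : (0 : Int) < c k := hpos k (by simp)
    obtain ⟨m, hopt, hpair⟩ := scanAux c t k
    have hmax : PySem.List.max? (k :: t) c = some m := by
      simp only [PySem.List.max?, List.foldl_cons]
      convert hopt using 2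
      funext acc x
      cases acc with
      | none => rfl
      | some m' => rfl
    simp only [hmax, Option.getD_some, List.foldl_cons]
    rw [if_pos hk]
    exact hpair

theorem minScan (x0 : Int) (r : List Int) :
    (x0 :: r).foldl (fun s x => if s > x then x else s) x0 = (PySem.List.min? (x0 :: r) (fun v => v)).getD 0 := by
  rw [PySem.List.min?_id_cons, Option.getD_some, List.foldl_cons]
  have h0 : (if x0 > x0 then x0 else x0) = x0 := by split_ifs <;> rfl
  rw [h0]
  exact PySem.List.foldl_congr_mem _ _ _ _ (by intro acc x _; rw [min_def]; split_ifs <;> omega)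

theorem maxScan (x0 : Int) (r : List Int) :
    (x0 :: r).foldl (fun s x => if s < x then x else s) x0 = (PySem.List.max? (x0 :: r) (fun v => v)).getD 0 := by
  rw [PySem.List.max?_id_cons, Option.getD_some, List.foldl_cons]
  have h0 : (if x0 < x0 then x0 else x0) = x0 := by split_ifs <;> rfl
  rw [h0]
  exact PySem.List.foldl_congr_mem _ _ _ _ (by intro acc x _; rw [max_def]; split_ifs <;> omega)

theorem histCount (xs : List Int) (v : Int) :
    (xs.foldl (fun (d : PySem.Dict Int Int) x => d.insert x (d.getD x 0 + 1)) PySem.Dict.empty).getD v 0 = (xs.count v : Int) := by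
  rw [PySem.Dict.getD_foldl_insert_add_one]
  simp

theorem histKeys (xs : List Int) :
    (xs.foldl (fun (d : PySem.Dict Int Int) x => d.insert x (d.getD x 0 + 1)) PySem.Dict.empty).keys = PySem.Set.ofList xs := by
  rw [PySem.Dict.foldl_insert_getD_add_one_eq_counter]
  exact PySem.Dict.keys_counter xs

-- the champion fold started at x, versus started empty
theorem maxConsAux (c : Int → Int) (s : List Int) :
    ∀ (x : Int),
    s.foldl (fun (acc : Option Int) y =>
        match acc with
        | none => some y
        | some m => if c m < c y then some y else some m) (some x)
    = some (match s.foldl (fun (acc : Option Int) y =>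
        match acc with
        | none => some y
        | some m => if c m < c y then some y else some m) none with
        | none => x
        | some m => if c x < c m then m else x) := by
  induction s with
  | nil => intro x; rfl
  | cons y t ih =>
    intro x
    simp only [List.foldl_cons]
    rw [show (if c x < c y then some y else some x) = some (if c x < c y then y else x) from by split_ifs <;> rfl]
    rw [ih (if c x < c y then y else x), ih y]
    cases ht : t.foldl (fun (acc : Option Int) y =>
        match acc with
        | none => some y
        | some m => if c m < c y then some y else some m) none with
    | none => simp
    | some mt =>
      simp only []
      split_ifs <;> simp_all <;> omega

-- max? of a cons in terms of max? of the tail (first maximal element wins)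
theorem max?_eq_fold (c : Int → Int) (l : List Int) :
    PySem.List.max? l c = l.foldl (fun (acc : Option Int) y =>
      match acc with
      | none => some y
      | some m => if c m < c y then some y else some m) none := by
  simp only [PySem.List.max?]
  congr 1
  funext acc x
  cases acc <;> rfl

theorem max?_cons (c : Int → Int) (x : Int) (s : List Int) :
    PySem.List.max? (x :: s) c
    = some (match PySem.List.max? s c with
        | none => x
        | some m => if c x < c m then m else x) := by
  rw [max?_eq_fold, max?_eq_fold, List.foldl_cons]
  exact maxConsAux c s x

-- key functions agreeing on the list give the same first-maximal element
theorem foldMax_congr (c c' : Int → Int) (s : List Int) :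
    (∀ y ∈ s, c y = c' y) →
    ∀ (acc : Option Int), (∀ a, acc = some a → c a = c' a) →
    s.foldl (fun (acc : Option Int) y =>
      match acc with
      | none => some y
      | some m => if c m < c y then some y else some m) acc
    = s.foldl (fun (acc : Option Int) y =>
      match acc with
      | none => some y
      | some m => if c' m < c' y then some y else some m) acc := by
  induction s with
  | nil => intro _ acc _; rfl
  | cons y t ih =>
    intro h acc hacc
    have hy : c y = c' y := h y (by simp)
    have ht : ∀ z ∈ t, c z = c' z := fun z hz => h z (List.mem_cons_of_mem _ hz)
    have hinvy : ∀ a, (some y : Option Int) = some a → c a = c' a := by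
      intro a ha; injection ha with h2; subst h2; exact hy
    simp only [List.foldl_cons]
    cases acc with
    | none => exact ih ht (some y) hinvy
    | some a =>
      have ha : c a = c' a := hacc a rfl
      dsimp only
      by_cases hlt : c a < c y
      · have hlt' : c' a < c' y := by rw [← ha, ← hy]; exact hlt
        rw [if_pos hlt, if_pos hlt']
        exact ih ht (some y) hinvy
      · have hlt' : ¬ c' a < c' y := by rw [← ha, ← hy]; exact hlt
        rw [if_neg hlt, if_neg hlt']
        exact ih ht (some a) (by intro b hb; injection hb with h2; subst h2; exact ha)

theorem max?_congr (c c' : Int → Int) (s : List Int) (h : ∀ y ∈ s, c y = c' y) :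
    PySem.List.max? s c = PySem.List.max? s c' := by
  rw [max?_eq_fold, max?_eq_fold]
  exact foldMax_congr c c' s h none (by simp)

-- counts of k ≠ v survive filtering v out
theorem count_filter_ne (l : List Int) (v k : Int) (h : k ≠ v) :
    (l.filter (fun x => decide (x ≠ v))).count k = l.count k := by
  rw [List.count_filter (by simp [h])]

theorem add_of_mem (s : List Int) (x : Int) (h : x ∈ s) : PySem.Set.add s x = s := by
  simp [PySem.Set.add, PySem.Set.contains, h]

theorem add_cons_ne (s : List Int) (x v : Int) (h : x ≠ v) :
    PySem.Set.add (v :: s) x = v :: PySem.Set.add s x := by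
  simp only [PySem.Set.add, PySem.Set.contains, List.contains_cons]
  have hb : (x == v) = false := by simp [h]
  rw [hb]
  simp only [Bool.false_or]
  split_ifs <;> simp

theorem foldl_add_filter (v : Int) (rest : List Int) :
    ∀ (s : List Int), v ∈ s →
    rest.foldl PySem.Set.add s = (rest.filter (fun x => decide (x ≠ v))).foldl PySem.Set.add s := by
  induction rest with
  | nil => intro s _; rfl
  | cons x t ih =>
    intro s hv
    by_cases hxv : x = v
    · subst hxv
      simp only [List.filter_cons, decide_not, List.foldl_cons]
      rw [add_of_mem s x hv]
      simpa using ih s hv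
    · have hd : (fun y => decide (y ≠ v)) x = true := by simp [hxv]
      simp only [List.filter_cons, hd, if_pos, List.foldl_cons]
      exact ih (PySem.Set.add s x) ((PySem.Set.mem_add s x v).mpr (Or.inl hv))

theorem foldl_add_cons_head (v : Int) (l : List Int) :
    ∀ (s : List Int), (∀ x ∈ l, x ≠ v) →
    l.foldl PySem.Set.add (v :: s) = v :: l.foldl PySem.Set.add s := by
  induction l with
  | nil => intro s _; rfl
  | cons x t ih =>
    intro s hx
    simp only [List.foldl_cons]
    rw [add_cons_ne s x v (hx x (by simp))]
    exact ih _ (fun z hz => hx z (List.mem_cons_of_mem _ hz))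

-- Set.ofList of a cons: head, then the distinct values of the tail without the head value
theorem ofList_cons_filter (v : Int) (rest : List Int) :
    PySem.Set.ofList (v :: rest) = v :: PySem.Set.ofList (rest.filter (fun x => decide (x ≠ v))) := by
  rw [PySem.Set.ofList_eq_foldl, PySem.Set.ofList_eq_foldl, List.foldl_cons]
  have h0 : PySem.Set.add PySem.Set.empty v = [v] := rfl
  rw [show PySem.Set.add ([] : List Int) v = [v] from rfl]
  rw [foldl_add_filter v rest [v] (by simp)]
  exact foldl_add_cons_head v _ []
    (fun x hx => by simpa using (List.of_mem_filter hx))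

-- B's recursion computes the first-inserted value of maximal count, with its count
theorem modeB_eq_aux (n : Nat) :
    ∀ (l : List Int), l.length ≤ n → l ≠ [] →
    ∃ m : Int, PySem.List.max? (PySem.Set.ofList l) (fun k => (l.count k : Int)) = some m ∧
      modeB l = some (m, l.count m) := by
  induction n with
  | zero =>
    intro l hlen hne
    cases l with
    | nil => exact absurd rfl hne
    | cons v rest => simp at hlen
  | succ n ih =>
    intro l hlen hne
    cases l with
    | nil => exact absurd rfl hne
    | cons v rest =>
      have hfc : (v :: rest).filter (fun x => decide (x ≠ v)) = rest.filter (fun x => decide (x ≠ v)) := by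
        simp
      rw [modeB, hfc]
      rw [ofList_cons_filter]
      by_cases hl' : rest.filter (fun x => decide (x ≠ v)) = []
      · rw [hl']
        refine ⟨v, rfl, ?_⟩
        rw [modeB]
      · have hlen' : (rest.filter (fun x => decide (x ≠ v))).length ≤ n := by
          have h1 := List.length_filter_le (fun x => decide (x ≠ v)) rest
          simp only [List.length_cons] at hlen
          omega
        obtain ⟨m', hmax', hmode'⟩ := ih _ hlen' hl'
        have hmem : ∀ k ∈ PySem.Set.ofList (rest.filter (fun x => decide (x ≠ v))), k ≠ v := by
          intro k hk
          have : k ∈ rest.filter (fun x => decide (x ≠ v)) := (PySem.Set.mem_ofList _ _).mp hk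
          simpa using List.of_mem_filter this
        have hkey : ∀ k ∈ PySem.Set.ofList (rest.filter (fun x => decide (x ≠ v))),
            ((rest.filter (fun x => decide (x ≠ v))).count k : Int) = ((v :: rest).count k : Int) := by
          intro k hk
          rw [count_filter_ne rest v k (hmem k hk), List.count_cons_of_ne (Ne.symm (hmem k hk))]
        have hmax2 : PySem.List.max? (PySem.Set.ofList (rest.filter (fun x => decide (x ≠ v))))
            (fun k => ((v :: rest).count k : Int)) = some m' :=
          (max?_congr _ _ _ hkey).symm.trans hmax'
        have hm'mem := PySem.List.max?_mem hmax'
        have hm'v : m' ≠ v := hmem m' hm'mem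
        have hcnt : (v :: rest).count m' = (rest.filter (fun x => decide (x ≠ v))).count m' := by
          rw [count_filter_ne rest v m' hm'v, List.count_cons_of_ne (Ne.symm hm'v)]
        rw [max?_cons, hmax2, hmode']
        simp only []
        by_cases hlt : (v :: rest).count v < (rest.filter (fun x => decide (x ≠ v))).count m'
        · have hlti : ((v :: rest).count v : Int) < ((v :: rest).count m' : Int) := by
            rw [hcnt]; exact_mod_cast hlt
          refine ⟨m', ?_, ?_⟩
          · rw [if_pos hlti]
          · rw [if_pos hlt, hcnt]
        · have hlti : ¬ ((v :: rest).count v : Int) < ((v :: rest).count m' : Int) := by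
            rw [hcnt]; exact_mod_cast hlt
          refine ⟨v, ?_, ?_⟩
          · rw [if_neg hlti]
          · rw [if_neg hlt]

theorem modeB_eq (l : List Int) (hne : l ≠ []) :
    ∃ m : Int, PySem.List.max? (PySem.Set.ofList l) (fun k => (l.count k : Int)) = some m ∧
      modeB l = some (m, l.count m) := modeB_eq_aux l.length l le_rfl hne

-- A's dict-keys mode scan and B's recursive mode agree
theorem modePair (xs : List Int) (hne : xs ≠ []) :
    ∃ m : Int, modeB xs = some (m, xs.count m) ∧
    (xs.foldl (fun (d : PySem.Dict Int Int) x => d.insert x (d.getD x 0 + 1)) PySem.Dict.empty).keys.foldl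
      (fun (p : Int × Int) k =>
        if p.2 < (xs.foldl (fun (d : PySem.Dict Int Int) x => d.insert x (d.getD x 0 + 1)) PySem.Dict.empty).getD k 0
        then (k, (xs.foldl (fun (d : PySem.Dict Int Int) x => d.insert x (d.getD x 0 + 1)) PySem.Dict.empty).getD k 0) else p)
      ((-1 : Int), (0 : Int)) = (m, (xs.count m : Int)) := by
  obtain ⟨m, hmax, hmode⟩ := modeB_eq xs hne
  have hkne : (xs.foldl (fun (d : PySem.Dict Int Int) x => d.insert x (d.getD x 0 + 1)) PySem.Dict.empty).keys ≠ [] := by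
    rw [histKeys]
    obtain ⟨x, xs', rfl⟩ := List.exists_cons_of_ne_nil hne
    exact List.ne_nil_of_mem ((PySem.Set.mem_ofList _ _).mpr List.mem_cons_self)
  have hpos : ∀ k ∈ (xs.foldl (fun (d : PySem.Dict Int Int) x => d.insert x (d.getD x 0 + 1)) PySem.Dict.empty).keys,
      0 < (xs.foldl (fun (d : PySem.Dict Int Int) x => d.insert x (d.getD x 0 + 1)) PySem.Dict.empty).getD k 0 := by
    intro k hk
    rw [histKeys] at hk
    rw [histCount]
    exact_mod_cast List.count_pos_iff.mpr ((PySem.Set.mem_ofList _ _).mp hk)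
  refine ⟨m, hmode, ?_⟩
  rw [modeScan _ _ hkne hpos]
  have hmx : PySem.List.max? (xs.foldl (fun (d : PySem.Dict Int Int) x => d.insert x (d.getD x 0 + 1)) PySem.Dict.empty).keys
      (fun k => (xs.foldl (fun (d : PySem.Dict Int Int) x => d.insert x (d.getD x 0 + 1)) PySem.Dict.empty).getD k 0) = some m := by
    rw [histKeys]
    rw [max?_congr _ (fun k => (xs.count k : Int)) _ (fun k _ => histCount xs k)]
    exact hmax
  rw [hmx, Option.getD_some, histCount]

-- ===== VERDICT (by name: the statement is the Claim_ definition above) =====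
theorem getLineStatisticParas_spec : Claim_equal_getLineStatisticParas := by
  intro line _ hpre
  obtain ⟨hne, _⟩ := hpre
  obtain ⟨p, t, rfl⟩ := List.exists_cons_of_ne_nil hne
  unfold Spec_getLineStatisticParas getLineStatisticParas getLineStatisticParas_alt statsB
  simp only [foldFirst, List.map_cons]
  have hp : (PySem.List.pyGet? (p :: t) (0 : Int)).getD [] = p := by simp [PySem.List.pyGet?, PySem.List.pyIdx?]
  simp only [hp]
  obtain ⟨mx, hmodex, hscanx⟩ := modePair (xOf p :: List.map xOf t) (List.cons_ne_nil _ _)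
  obtain ⟨my, hmodey, hscany⟩ := modePair (yOf p :: List.map yOf t) (List.cons_ne_nil _ _)
  rw [hscanx, hscany, hmodex, hmodey]
  simp only [Option.getD_some]
  rw [foldSums]
  simp only [List.map_cons, zero_add]
  rw [minScan (xOf p) (List.map xOf t), maxScan (xOf p) (List.map xOf t),
      minScan (yOf p) (List.map yOf t), maxScan (yOf p) (List.map yOf t)]
  simp only [gt_iff_lt, Nat.cast_lt]
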